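-- pv_equiv track=rewrite | github.com/RandyViG/Cryptography | Session3/GF.py | calculateTable
-- ===== SOURCE A (Python) =====
-- def calculateTable( n , r ):
--     title = [ 0 ]
--     table = [ ]
--     polynomialsI = [ 11 , 19 , 37 , 67 , 131 , 283 ]
--     module = polynomialsI[ n - 3 ]
--     valuesArchived = [ ]
--     for t in range( 1 , 2**n):
--         title.append(t)
--     table.append(title)
--     for i in range( 1, 2**n ):
--         valuesArchived.append( calculateValues( i , n , module ) )
--     for j in range( 1 , ( 2**n ) ):
--         table.append( calculateRow( j,  valuesArchived , n ) )
--
--     if r == 'h':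
--         table = hexadecimal( table )
--     else:
--         table = polynomial( table )
--
--     return table
--
-- def calculateValues( i , n , module ):
--     values = [ ]
--     prev = i
--     values.append( prev )
--     for j in range( 2 , n+1 ):
--         aux = prev << 1
--         if ( prev & (2**(n-1)) ):
--             aux = ( aux ^ module ) & (2**n-1)
--         prev = aux
--         values.append( aux )
--     return values
--
-- def calculateRow( val , rowValues , n ):
--     row = [ val ]
--     for i in range(1,2**n):
--         decompose = [ ]
--         for j in range(n):
--             aux = rowValues[ val-1 ]
--             if( i & 2**j ):
--                 decompose.append( aux[j] )
--         xor = 0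
--         for a in range( len(decompose) ):
--             xor = xor ^ decompose[a]
--         row.append(xor)
--     return row
--
-- def hexadecimal( table ):
--     tableHexa = [ ]
--     for t in table:
--         row = [ ]
--         for r in t:
--             row.append( hex( r ) )
--         tableHexa.append( row )
--     return tableHexa
--
-- def polynomial( table ):
--     tablePol = [ ]
--     for t in table:
--         row = [ ]
--         for r in t:
--             row.append( convert( r ) )
--         tablePol.append( row )
--     return tablePol
--
-- def convert( pol ):
--     polynom = ''
--     for i in range(7):
--         if ( pol & 2**i ):
--             if ( i == 0 ):
--                 cad = '1'
--             else:
--                 cad = 'X^'+str(2**i)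
--
--             polynom =  cad + '+' + polynom
--     return polynom[:-1]
-- ===== SOURCE B (Python) =====
-- def calculateTable(n, r):
--     polynomialsI = [11, 19, 37, 67, 131, 283]
--     module = polynomialsI[n - 3]
--     size = 2 ** n
--     mask = size - 1
--     high = 2 ** (n - 1)
--     table = [list(range(size))]
--     for j in range(1, size):
--         table.append([j] + [gfmul(j, i, module, mask, high) for i in range(1, size)])
--     if r == 'h':
--         return [[hex(v) for v in row] for row in table]
--     return [[convert(v) for v in row] for row in table]
--
-- def gfmul(a, b, module, mask, high):
--     result = 0
--     cur = a
--     while b: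
--         if b & 1:
--             result ^= cur
--         carry = cur & high
--         cur = cur << 1
--         if carry:
--             cur = (cur ^ module) & mask
--         b >>= 1
--     return result
--
-- def convert(pol):
--     parts = []
--     for i in range(6, -1, -1):
--         if pol & 2 ** i:
--             parts.append('1' if i == 0 else 'X^' + str(2 ** i))
--     return '+'.join(parts)
-- ===== Notes on version B (the rewrite author's own statement) =====
-- stated objective: alternative
-- what changed: B computes each cell with a direct shift-and-xor Galois multiplication gfmul(j,i) over the bits of i, instead of A's precomputed per-row xtime table (valuesArchived) plus a bit-decompose-then-xor pass per cell; the hex/polynomial rendering is unchanged.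
import Mathlib
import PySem

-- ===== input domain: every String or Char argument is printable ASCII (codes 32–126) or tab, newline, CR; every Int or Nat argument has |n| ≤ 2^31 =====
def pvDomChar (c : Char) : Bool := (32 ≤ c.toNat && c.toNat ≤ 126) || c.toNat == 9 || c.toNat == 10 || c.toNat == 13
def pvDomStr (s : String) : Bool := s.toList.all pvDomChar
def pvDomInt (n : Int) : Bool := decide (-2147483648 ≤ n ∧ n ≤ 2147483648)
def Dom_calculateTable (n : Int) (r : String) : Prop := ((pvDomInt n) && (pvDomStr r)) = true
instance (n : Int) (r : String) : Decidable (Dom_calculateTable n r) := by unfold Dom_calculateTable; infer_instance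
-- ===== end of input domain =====

-- B replaces A's precomputed xtime-table + per-cell bit-decompose-and-xor with a direct
-- shift-and-xor Galois multiplication gfmul(j, i); the hex/polynomial rendering is unchanged.

-- ===== shared primitives (Python builtins) =====

-- 2**e for e ≥ 0 (Python's 2**e; a negative e, which makes Python produce a float, is outside Pre_)
def pyPow2 (e : Int) : Int := 2 ^ e.toNat

-- hex digit (lowercase), exact port of the characters CPython's hex() emits
def hexDigit (d : Nat) : Char := (['0','1','2','3','4','5','6','7','8','9','a','b','c','d','e','f']).getD d '0'

def hexChars (m : Nat) : List Char :=
  if m < 16 then [hexDigit m]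
  else hexChars (m / 16) ++ [hexDigit (m % 16)]
decreasing_by exact Nat.div_lt_self (by omega) (by omega)

-- Python's hex(v): '0x…' lowercase, '-0x…' for negatives
def pyHex (v : Int) : String :=
  if v < 0 then String.ofList ('-' :: '0' :: 'x' :: hexChars (-v).toNat)
  else String.ofList ('0' :: 'x' :: hexChars v.toNat)

-- ===== PORT A =====

def calculateValuesA (i n module : Int) : List Int :=
  let values : List Int := []
  let prev := i
  let values := values ++ [prev]
  let st := (PySem.List.pyRange 2 (n + 1) 1).foldl (fun (st : Int × List Int) _j =>
    let aux := st.1 <<< 1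
    let aux := if PySem.Int.band st.1 (pyPow2 (n - 1)) ≠ 0
               then PySem.Int.band (PySem.Int.bxor aux module) (pyPow2 n - 1)
               else aux
    (aux, st.2 ++ [aux])) (prev, values)
  st.2

def calculateRowA (val : Int) (rowValues : List (List Int)) (n : Int) : List Int :=
  let row : List Int := [val]
  (PySem.List.pyRange 1 (pyPow2 n) 1).foldl (fun row i =>
    let decompose : List Int := []
    let decompose := (PySem.List.pyRange 0 n 1).foldl (fun d j =>
      let aux := PySem.List.pyGetD rowValues (val - 1) []
      if PySem.Int.band i (pyPow2 j) ≠ 0 then d ++ [PySem.List.pyGetD aux j 0] else d) decompose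
    let xor := (PySem.List.pyRange 0 (decompose.length : Int) 1).foldl
      (fun x a => PySem.Int.bxor x (PySem.List.pyGetD decompose a 0)) 0
    row ++ [xor]) row

def hexadecimalA (table : List (List Int)) : List (List String) :=
  table.foldl (fun acc t => acc ++ [t.foldl (fun row r => row ++ [pyHex r]) []]) []

def convertA (pol : Int) : String :=
  let polynom : List Char := []
  let polynom := (PySem.List.pyRange 0 7 1).foldl (fun polynom i =>
    if PySem.Int.band pol (pyPow2 i) ≠ 0 then
      let cad := if i = 0 then ['1'] else ['X', '^'] ++ PySem.Int.toChars (pyPow2 i)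
      (cad ++ ['+']) ++ polynom
    else polynom) polynom
  String.ofList (PySem.Chars.slice polynom none (some (-1)))

def polynomialA (table : List (List Int)) : List (List String) :=
  table.foldl (fun acc t => acc ++ [t.foldl (fun row r => row ++ [convertA r]) []]) []

def calculateTable (n : Int) (r : String) : List (List String) :=
  let title : List Int := [0]
  let table : List (List Int) := []
  let polynomialsI : List Int := [11, 19, 37, 67, 131, 283]
  let module := PySem.List.pyGetD polynomialsI (n - 3) 0   -- IndexError outside Pre_
  let title := title ++ PySem.List.pyRange 1 (pyPow2 n) 1
  let table := table ++ [title]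
  let valuesArchived := (PySem.List.pyRange 1 (pyPow2 n) 1).foldl
    (fun acc i => acc ++ [calculateValuesA i n module]) []
  let table := (PySem.List.pyRange 1 (pyPow2 n) 1).foldl
    (fun tbl j => tbl ++ [calculateRowA j valuesArchived n]) table
  if r == "h" then hexadecimalA table else polynomialA table

-- ===== PORT B =====

def gfmulGo (result cur : Int) (b : Nat) (module mask high : Int) : Int :=
  if b = 0 then result
  else
    let result := if b &&& 1 ≠ 0 then PySem.Int.bxor result cur else result
    let carry := PySem.Int.band cur high
    let cur' := cur <<< 1
    let cur' := if carry ≠ 0 then PySem.Int.band (PySem.Int.bxor cur' module) mask else cur'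
    gfmulGo result cur' (b >>> 1) module mask high
decreasing_by simpa [Nat.shiftRight_succ, Nat.shiftRight_zero] using Nat.div_lt_self (by omega) (by omega)

-- b comes from range(1, size), so it is a nonnegative int: the while-loop runs over its bits
def gfmulB (a b module mask high : Int) : Int := gfmulGo 0 a b.toNat module mask high

def convertB (pol : Int) : String :=
  let parts := (PySem.List.pyRange 6 (-1) (-1)).foldl (fun ps i =>
    if PySem.Int.band pol (pyPow2 i) ≠ 0 then
      ps ++ [if i = 0 then ['1'] else ['X', '^'] ++ PySem.Int.toChars (pyPow2 i)]
    else ps) []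
  String.ofList (PySem.Chars.join ['+'] parts)

def calculateTable_alt (n : Int) (r : String) : List (List String) :=
  let polynomialsI : List Int := [11, 19, 37, 67, 131, 283]
  let module := PySem.List.pyGetD polynomialsI (n - 3) 0   -- IndexError outside Pre_
  let size := pyPow2 n
  let mask := size - 1
  let high := pyPow2 (n - 1)
  let table : List (List Int) := [PySem.List.pyRange 0 size 1]
  let table := (PySem.List.pyRange 1 size 1).foldl (fun tbl j =>
    tbl ++ [j :: (PySem.List.pyRange 1 size 1).map (fun i => gfmulB j i module mask high)]) table
  if r == "h" then table.map (fun row => row.map pyHex)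
  else table.map (fun row => row.map convertB)

-- ===== PRECONDITION & SPEC =====

-- Pre_ excludes exactly the inputs where A raises: n ≥ 9 hits IndexError on polynomialsI[n-3],
-- n < 0 hits IndexError or TypeError (2**n is a float).
def Pre_calculateTable (n : Int) (r : String) : Prop := 0 ≤ n ∧ n ≤ 8
instance (n : Int) (r : String) : Decidable (Pre_calculateTable n r) := by
  unfold Pre_calculateTable; infer_instance

def pvWitness_calculateTable : Int × String := (3, "h")

def Spec_calculateTable (n : Int) (r : String) (out : List (List String)) : Prop :=
  out = calculateTable_alt n r
instance (n : Int) (r : String) (out : List (List String)) : Decidable (Spec_calculateTable n r out) := by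
  unfold Spec_calculateTable; infer_instance

-- ===== CLAIM (what is proved, stated in full; the proofs are below) =====
def Claim_equal_calculateTable : Prop := ∀ (n : Int) (r : String),
  Dom_calculateTable n r → Pre_calculateTable n r → Spec_calculateTable n r (calculateTable n r)


-- ===== LEMMAS AND PROOFS =====

-- the common xtime step: shift left, reduce by the module when the high bit was set
def xstep (module mask high c : Int) : Int :=
  let carry := PySem.Int.band c high
  let c' := c <<< 1
  if carry ≠ 0 then PySem.Int.band (PySem.Int.bxor c' module) mask else c'

-- an append-the-image-of-the-iterate loop, characterised abstractly
theorem valsAux (f : Int → Int) (l : List Int) (p : Int) (acc : List Int) :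
    (l.foldl (fun (st : Int × List Int) _j => (f st.1, st.2 ++ [f st.1])) (p, acc)).2
    = acc ++ (List.range l.length).map (fun k => f^[k + 1] p) := by
  induction l generalizing p acc with
  | nil => simp
  | cons x xs ih =>
    simp only [List.foldl_cons]
    rw [ih]
    simp only [List.length_cons]
    rw [List.range_succ_eq_map]
    simp
    rw [← List.range_map_iterate]
    apply List.map_congr_left
    intro k _
    simp [Function.comp, Function.iterate_succ_apply]

-- A's calculateValues archives exactly the iterates of xstep
theorem calcValsA_eq (i n module : Int) :
    calculateValuesA i n module
    = (List.range ((n - 1).toNat + 1)).map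
        (fun k => (xstep module (pyPow2 n - 1) (pyPow2 (n - 1)))^[k] i) := by
  unfold calculateValuesA
  rw [show (fun (st : Int × List Int) _j =>
        let aux := st.1 <<< 1;
        let aux := if PySem.Int.band st.1 (pyPow2 (n - 1)) ≠ 0
                   then PySem.Int.band (PySem.Int.bxor aux module) (pyPow2 n - 1) else aux;
        (aux, st.2 ++ [aux]))
      = (fun (st : Int × List Int) (_j : Int) =>
        (xstep module (pyPow2 n - 1) (pyPow2 (n - 1)) st.1,
         st.2 ++ [xstep module (pyPow2 n - 1) (pyPow2 (n - 1)) st.1])) from rfl]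
  rw [valsAux, PySem.List.length_pyRange_one,
    show (n + 1 - 2 : Int) = n - 1 from by ring, List.range_succ_eq_map]
  simp
  rw [← List.range_map_iterate]
  apply List.map_congr_left
  intro k _
  simp [Function.comp, Function.iterate_succ_apply]

-- B's while-loop folds the set bits of b (below any bound covering b)
theorem gfmulGo_eq (module mask high : Int) :
    ∀ (m : Nat) (b : Nat), b < 2 ^ m → ∀ (cur res : Int),
    gfmulGo res cur b module mask high
    = (List.range m).foldl
        (fun x k => if b.testBit k then PySem.Int.bxor x ((xstep module mask high)^[k] cur) else x)
        res := by
  intro m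
  induction m with
  | zero =>
    intro b hb cur res
    have hb0 : b = 0 := by omega
    subst hb0
    simp [gfmulGo]
  | succ m ih =>
    intro b hb cur res
    by_cases h0 : b = 0
    · subst h0
      rw [gfmulGo]
      simp [Nat.zero_testBit]
    · rw [gfmulGo]
      simp only [if_neg h0]
      have hx : (if PySem.Int.band cur high ≠ 0
          then PySem.Int.band (PySem.Int.bxor (cur <<< 1) module) mask
          else cur <<< 1) = xstep module mask high cur := rfl
      have hdiv : b >>> 1 < 2 ^ m := by rw [Nat.shiftRight_one]; omega
      rw [hx, ih (b >>> 1) hdiv (xstep module mask high cur)]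
      rw [List.range_succ_eq_map, List.foldl_cons, List.foldl_map]
      have hbit0 : b.testBit 0 = decide (b &&& 1 ≠ 0) := by
        rw [Nat.and_one_is_mod, Nat.testBit_zero]
        rcases Nat.mod_two_eq_zero_or_one b with h | h <;> simp [h]
      have hh : (if b &&& 1 ≠ 0 then PySem.Int.bxor res cur else res)
          = (if b.testBit 0 then PySem.Int.bxor res ((xstep module mask high)^[0] cur) else res) := by
        rw [hbit0]
        split_ifs <;> simp_all
      rw [hh]
      congr 1
      funext x k
      simp [Nat.shiftRight_one, Nat.testBit_add_one, Function.iterate_succ_apply]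

-- xor-fold of a filtered-and-mapped list as a conditional fold
theorem foldXorFilterMap {α : Type} (l : List α) (p : α → Bool) (g : α → Int) (init : Int) :
    ((l.filter p).map g).foldl PySem.Int.bxor init
    = l.foldl (fun x k => if p k then PySem.Int.bxor x (g k) else x) init := by
  induction l generalizing init with
  | nil => rfl
  | cons x xs ih =>
    by_cases h : p x <;> simp [h, ih]

-- bit-test bridge: Python's  i & 2**k != 0
theorem band_pow2_ne_zero (i : Int) (hi : 0 ≤ i) (k : Nat) :
    (PySem.Int.band i (pyPow2 (k : Int)) ≠ 0) ↔ i.toNat.testBit k := by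
  lift i to ℕ using hi with m
  have h2 : pyPow2 (k : Int) = ((2 ^ k : Nat) : Int) := by simp [pyPow2]
  rw [h2, PySem.Int.band_natCast, Nat.and_two_pow]
  cases hbt : (Int.toNat m).testBit k
  · simp_all
  · simp_all

-- each non-title row of A equals B's gfmul row
theorem rowA_eq (n module : Int) (j : Int) (hj1 : 1 ≤ j) (hjS : j < pyPow2 n) :
    calculateRowA j
      ((PySem.List.pyRange 1 (pyPow2 n) 1).map (fun i => calculateValuesA i n module)) n
    = j :: (PySem.List.pyRange 1 (pyPow2 n) 1).map
        (fun i => gfmulB j i module (pyPow2 n - 1) (pyPow2 (n - 1))) := by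
  have hSdef : pyPow2 n = ((2 ^ n.toNat : Nat) : Int) := by simp [pyPow2]
  have hN1 : 1 ≤ n.toNat := by
    by_contra h
    have : n.toNat = 0 := by omega
    rw [hSdef, this] at hjS
    simp at hjS
    omega
  -- the archived-values lookup used by every cell of this row
  have harch : PySem.List.pyGetD
      ((PySem.List.pyRange 1 (pyPow2 n) 1).map (fun i => calculateValuesA i n module))
      (j - 1) []
      = (List.range n.toNat).map
          (fun k => (xstep module (pyPow2 n - 1) (pyPow2 (n - 1)))^[k] j) := by
    have hjk : (j - 1 : Int) = (((j - 1).toNat : Nat) : Int) := by omega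
    rw [hjk, PySem.List.pyGetD_map_pyRange_one _ _ _ _ _ (by omega)]
    rw [show (1 + (((j - 1).toNat : Nat) : Int)) = j from by omega]
    rw [calcValsA_eq, show (n - 1).toNat + 1 = n.toNat from by omega]
  unfold calculateRowA
  rw [PySem.List.foldl_append_singleton_eq_map, List.singleton_append]
  congr 1
  apply List.map_congr_left
  intro i hi
  rw [PySem.List.mem_pyRange_one] at hi
  simp only [harch, PySem.List.foldl_append_ite, List.nil_append]
  rw [← PySem.List.len_eq, PySem.List.foldl_pyRange_zero_pyGetD, foldXorFilterMap]
  unfold gfmulB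
  have hbound : i.toNat < 2 ^ n.toNat := by omega
  rw [gfmulGo_eq module (pyPow2 n - 1) (pyPow2 (n - 1)) n.toNat i.toNat hbound j 0]
  rw [PySem.List.pyRange_one 0 n, show (n - 0 : Int) = n from by ring, List.foldl_map]
  apply PySem.List.foldl_congr_mem
  intro acc k hk
  rw [List.mem_range] at hk
  have hi0 : (0 : Int) ≤ i := by omega
  have hcond : (PySem.Int.band i (pyPow2 (0 + (k : Int))) ≠ 0) ↔ i.toNat.testBit k := by
    rw [zero_add]
    exact band_pow2_ne_zero i hi0 k
  have hval : PySem.List.pyGetD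
      ((List.range n.toNat).map (fun k => (xstep module (pyPow2 n - 1) (pyPow2 (n - 1)))^[k] j))
      (0 + (k : Int)) 0
      = (xstep module (pyPow2 n - 1) (pyPow2 (n - 1)))^[k] j := by
    rw [zero_add, PySem.List.pyGetD_natCast, PySem.List.getD_map_range _ _ _ _ hk]
  simp only [decide_eq_true_eq, hcond, hval]

-- prepending 'part + sep' for each hit builds the reversed filtered parts, concatenated
theorem foldl_prepend_if {α : Type} (p : α → Prop) [DecidablePred p] (g : α → List Char)
    (l : List α) (acc : List Char) :
    l.foldl (fun pl i => if p i then g i ++ pl else pl) acc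
    = (((l.filter (fun x => decide (p x))).reverse.map g).flatten) ++ acc := by
  induction l generalizing acc with
  | nil => simp
  | cons x t ih =>
    simp only [List.foldl_cons, List.filter_cons]
    by_cases h : p x <;> simp [h, ih, List.append_assoc]

-- dropping the trailing separator of 'each part ++ sep' is exactly sep.join
theorem dropLast_flatten_plus {α : Type} (f : α → List Char) (l : List α) :
    ((l.map (fun i => f i ++ ['+'])).flatten).dropLast = PySem.Chars.join ['+'] (l.map f) := by
  induction l with
  | nil => simp [PySem.Chars.join, List.intercalate]
  | cons a t ih =>
    cases t with
    | nil => simp [PySem.Chars.join_singleton]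
    | cons b t2 =>
      have hne : ((b :: t2).map (fun i => f i ++ ['+'])).flatten ≠ [] := by simp
      rw [show (a :: b :: t2).map (fun i => f i ++ ['+'])
          = (f a ++ ['+']) :: (b :: t2).map (fun i => f i ++ ['+']) from rfl]
      rw [List.flatten_cons, List.append_assoc,
        List.dropLast_append_of_ne_nil (by simp),
        List.dropLast_append_of_ne_nil hne, ih]
      rw [show (a :: b :: t2).map f = f a :: f b :: t2.map f from rfl]
      rw [show List.map f (b :: t2) = f b :: t2.map f from rfl] 
      rw [PySem.Chars.join_cons_cons]
      simp [List.append_assoc]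

theorem convert_eq (pol : Int) : convertA pol = convertB pol := by
  simp only [convertA, convertB]
  rw [show PySem.List.pyRange 0 7 1 = [0, 1, 2, 3, 4, 5, 6] from by decide,
      show PySem.List.pyRange 6 (-1) (-1) = [6, 5, 4, 3, 2, 1, 0] from by decide]
  rw [foldl_prepend_if (fun i => PySem.Int.band pol (pyPow2 i) ≠ 0)
        (fun i => (if i = 0 then ['1'] else ['X', '^'] ++ PySem.Int.toChars (pyPow2 i)) ++ ['+'])]
  rw [PySem.List.foldl_append_ite (fun i => PySem.Int.band pol (pyPow2 i) ≠ 0)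
        (fun i => if i = 0 then ['1'] else ['X', '^'] ++ PySem.Int.toChars (pyPow2 i))]
  simp only [PySem.Chars.slice, List.append_nil, List.nil_append]
  rw [PySem.List.slice_to_neg_one]
  rw [show (fun i => (if i = (0 : Int) then ['1'] else ['X', '^'] ++ PySem.Int.toChars (pyPow2 i)) ++ ['+'])
      = (fun i => (fun x => if x = (0 : Int) then ['1'] else ['X', '^'] ++ PySem.Int.toChars (pyPow2 x)) i ++ ['+'])
      from rfl]
  rw [dropLast_flatten_plus]
  rw [show ([6, 5, 4, 3, 2, 1, 0] : List Int) = ([0, 1, 2, 3, 4, 5, 6] : List Int).reverse from rfl,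
    List.filter_reverse]

theorem hexA_eq (tbl : List (List Int)) :
    hexadecimalA tbl = tbl.map (fun t => t.map pyHex) := by
  unfold hexadecimalA
  rw [show (fun (acc : List (List String)) (t : List Int) =>
        acc ++ [t.foldl (fun row r => row ++ [pyHex r]) []])
      = (fun acc t => acc ++ [t.map pyHex]) from by
    funext acc t
    rw [PySem.List.foldl_append_singleton_eq_map, List.nil_append]]
  rw [PySem.List.foldl_append_singleton_eq_map, List.nil_append]

theorem polyA_eq (tbl : List (List Int)) :
    polynomialA tbl = tbl.map (fun t => t.map convertB) := by
  unfold polynomialA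
  rw [show (fun (acc : List (List String)) (t : List Int) =>
        acc ++ [t.foldl (fun row r => row ++ [convertA r]) []])
      = (fun acc t => acc ++ [t.map convertB]) from by
    funext acc t
    rw [PySem.List.foldl_append_singleton_eq_map, List.nil_append]
    exact congrArg (fun l => acc ++ [l]) (List.map_congr_left fun x _ => convert_eq x)]
  rw [PySem.List.foldl_append_singleton_eq_map, List.nil_append]

theorem calculateTable_equal (n : Int) (r : String) :
    0 ≤ n → calculateTable n r = calculateTable_alt n r := by
  intro hn
  unfold calculateTable calculateTable_alt
  simp only [PySem.List.foldl_append_singleton_eq_map, List.nil_append]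
  have hS1 : (0 : Int) < pyPow2 n := by
    have : (0 : Nat) < 2 ^ n.toNat := by positivity
    simp only [pyPow2]
    exact_mod_cast this
  have htitle : (0 : Int) :: PySem.List.pyRange 1 (pyPow2 n) 1
      = PySem.List.pyRange 0 (pyPow2 n) 1 := by
    rw [PySem.List.pyRange_one_cons hS1, zero_add]
  have htbl : [[(0 : Int)] ++ PySem.List.pyRange 1 (pyPow2 n) 1] ++
        (PySem.List.pyRange 1 (pyPow2 n) 1).map (fun j => calculateRowA j
          ((PySem.List.pyRange 1 (pyPow2 n) 1).map (fun i => calculateValuesA i n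
            (PySem.List.pyGetD [11, 19, 37, 67, 131, 283] (n - 3) 0))) n)
      = [PySem.List.pyRange 0 (pyPow2 n) 1] ++
        (PySem.List.pyRange 1 (pyPow2 n) 1).map (fun j => j ::
          (PySem.List.pyRange 1 (pyPow2 n) 1).map (fun i =>
            gfmulB j i (PySem.List.pyGetD [11, 19, 37, 67, 131, 283] (n - 3) 0)
              (pyPow2 n - 1) (pyPow2 (n - 1)))) := by
    simp only [List.singleton_append]
    rw [htitle]
    congr 1
    apply List.map_congr_left
    intro j hj
    rw [PySem.List.mem_pyRange_one] at hj
    exact rowA_eq n _ j hj.1 hj.2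
  by_cases hr : r == "h"
  · rw [if_pos hr, if_pos hr, hexA_eq, htbl]
  · rw [if_neg hr, if_neg hr, polyA_eq, htbl]

-- ===== VERDICT (by name: the statement is the Claim_ definition above) =====
theorem calculateTable_spec : Claim_equal_calculateTable := by
  intro n r _hD hP
  unfold Spec_calculateTable
  exact calculateTable_equal n r hP.1
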